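-- pv_equiv track=rewrite | github.com/shhuan1989/algorithms | codeforces/1335E.py | solve
-- ===== SOURCE A (Python) =====
-- import collections
--
-- def solve(N, A):
--     uniq = list(sorted(set(A)))
--     vmap = {v:i for i, v in enumerate(uniq)}
--     A = [vmap[v] for v in A]
--
--     wc = collections.Counter(A)
--     ans = max(wc.values())
--
--     M = len(uniq)
--     K = ans
--     pos = [[-1 for _ in range(K+1)] for _ in range(M)]
--     left = [[0 for _ in range(N)] for _ in range(M)]
--
--     cwc = collections.defaultdict(int)
--     for i, v in enumerate(A):
--         cwc[v] += 1
--         pos[v][cwc[v]] = i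
--
--         if i > 0:
--             for u in range(M):
--                 left[u][i] = left[u][i-1]
--         left[v][i] += 1
--
--
--
--     cwc = collections.defaultdict(int)
--     for i, v in enumerate(A):
--         cwc[v] += 1
--         j = pos[v][wc[v]-cwc[v]+1] - 1
--         if i < j:
--             for u in range(M):
--                 ans = max(ans, cwc[v] * 2 + (left[u][j] - left[u][i]))
--
--     return ans
-- ===== SOURCE B (Python) =====
-- def solve(N, A):
--     uniq = sorted(set(A))
--     vmap = {v: i for i, v in enumerate(uniq)}
--     B = [vmap[v] for v in A]
--     M = len(uniq)
--
--     # occurrence positions of each value, in increasing order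
--     poss = [[] for _ in range(M)]
--     for i, v in enumerate(B):
--         poss[v].append(i)
--
--     # binary search: number of elements of the sorted list ps that are < x
--     def bl(ps, x):
--         lo, hi = 0, len(ps)
--         while lo < hi:
--             mid = (lo + hi) // 2
--             if ps[mid] < x:
--                 lo = mid + 1
--             else:
--                 hi = mid
--         return lo
--
--     ans = max(len(p) for p in poss)
--     for v in range(M):
--         ps = poss[v]
--         m = len(ps)
--         for k in range(1, m // 2 + 1):
--             l, r = ps[k - 1], ps[m - k]
--             for u in range(M):
--                 ans = max(ans, 2 * k + bl(poss[u], r) - bl(poss[u], l + 1))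
--     return ans
-- ===== Notes on version B (the rewrite author's own statement) =====
-- stated objective: alternative
-- what changed: B keeps no prefix-count tables at all: it stores only each value's sorted occurrence-position list, enumerates the symmetric outer boundary pairs per value and per k, and counts middle occurrences with a hand-written binary search (elements strictly between the boundaries) on the position lists, whereas A maintains O(N*M) copied-forward prefix tables plus an occurrence-index partner lookup per array position.
import Mathlib
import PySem

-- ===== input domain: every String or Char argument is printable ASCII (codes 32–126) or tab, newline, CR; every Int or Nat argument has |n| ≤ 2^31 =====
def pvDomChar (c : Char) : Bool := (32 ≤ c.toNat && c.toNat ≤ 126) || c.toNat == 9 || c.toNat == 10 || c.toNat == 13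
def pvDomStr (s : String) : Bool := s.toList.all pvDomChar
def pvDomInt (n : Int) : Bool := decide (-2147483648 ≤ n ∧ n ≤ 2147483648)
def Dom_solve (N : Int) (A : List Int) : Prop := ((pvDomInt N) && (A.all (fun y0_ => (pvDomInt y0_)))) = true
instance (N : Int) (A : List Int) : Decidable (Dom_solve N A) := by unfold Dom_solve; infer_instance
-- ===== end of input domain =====

-- ===== PORT A =====
-- B drops A's prefix-count tables entirely: it keeps only each value's sorted occurrence-position
-- list, enumerates the symmetric outer boundary pairs per value and per k, and counts the middle
-- occurrences by a hand-written binary search on those position lists.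
-- Shared first lines of both Pythons: rank-remap of A via sorted(set(A)).
-- vmap[v]: the key is always present (uniq lists exactly A's values), so getD is exact (no KeyError).
def pvRemap (A : List Int) : List Int :=
  let uniq : List Int := PySem.List.sorted (PySem.Set.ofList A) (fun x => x) false
  let vmap : PySem.Dict Int Int :=
    (PySem.List.enumerate uniq 0).foldl (fun d p => d.insert p.2 p.1) PySem.Dict.empty
  A.map (fun v => vmap.getD v 0)

-- 2D table read/write, Python's t[a][b] / t[a][b] = x (pyGetD/pySetD keep Python's indexing rules)
def pvGet2 (t : List (List Int)) (a b : Int) : Int :=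
  PySem.List.pyGetD (PySem.List.pyGetD t a []) b 0

def pvSet2 (t : List (List Int)) (a b : Int) (x : Int) : List (List Int) :=
  PySem.List.pySetD t a (PySem.List.pySetD (PySem.List.pyGetD t a []) b x)

-- max(wc.values()) raises ValueError on empty A: excluded by Pre_solve, so getD 0 is exact.
def solve (N : Int) (A : List Int) : Int :=
  let uniq : List Int := PySem.List.sorted (PySem.Set.ofList A) (fun x => x) false
  let A' := pvRemap A
  let wc := PySem.Dict.counter A'
  let ans0 : Int := ((PySem.List.max? wc.values (fun x => x)).getD 0)
  let M : Int := PySem.List.len uniq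
  let K : Int := ans0
  let pos0 : List (List Int) :=
    (PySem.List.pyRange 0 M).map (fun _ => (PySem.List.pyRange 0 (K+1)).map (fun _ => (-1 : Int)))
  let left0 : List (List Int) :=
    (PySem.List.pyRange 0 M).map (fun _ => (PySem.List.pyRange 0 N).map (fun _ => (0 : Int)))
  let st := (PySem.List.enumerate A' 0).foldl (fun st p =>
      let i := p.1
      let v := p.2
      let cwc := st.1.modify v 0 (· + 1)
      let pos := pvSet2 st.2.1 v (cwc.getD v 0) i
      let left := if 0 < i then
          (PySem.List.pyRange 0 M).foldl (fun lf u => pvSet2 lf u i (pvGet2 lf u (i-1))) st.2.2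
        else st.2.2
      let left := pvSet2 left v i (pvGet2 left v i + 1)
      (cwc, pos, left))
    ((PySem.Dict.empty : PySem.Dict Int Int), pos0, left0)
  let pos := st.2.1
  let left := st.2.2
  let fin := (PySem.List.enumerate A' 0).foldl (fun st p =>
      let i := p.1
      let v := p.2
      let cwc := st.1.modify v 0 (· + 1)
      let j := pvGet2 pos v (wc.getD v 0 - cwc.getD v 0 + 1) - 1
      let ans := if i < j then
          (PySem.List.pyRange 0 M).foldl
            (fun a u => max a (cwc.getD v 0 * 2 + (pvGet2 left u j - pvGet2 left u i))) st.2
        else st.2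
      (cwc, ans))
    ((PySem.Dict.empty : PySem.Dict Int Int), ans0)
  fin.2

-- ===== PORT B =====
-- bl's while loop, with an explicit iteration bound as fuel (hi - lo shrinks every pass,
-- so len ps iterations always suffice); returns the number of elements of sorted ps that are < x
def pvBlGo (ps : List Int) (x : Int) : Nat → Int → Int → Int
  | 0, lo, _ => lo
  | (f+1), lo, hi =>
    if lo < hi then
      let mid := PySem.Int.floordiv (lo + hi) 2
      if PySem.List.pyGetD ps mid 0 < x then pvBlGo ps x f (mid + 1) hi
      else pvBlGo ps x f lo mid
    else lo

def pvBl (ps : List Int) (x : Int) : Int := pvBlGo ps x (PySem.List.len ps).toNat 0 (PySem.List.len ps)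

-- max(len(p) for p in poss) raises ValueError on empty A: excluded by Pre_solve, so getD 0 is exact.
def solve_alt (N : Int) (A : List Int) : Int :=
  let uniq : List Int := PySem.List.sorted (PySem.Set.ofList A) (fun x => x) false
  let B := pvRemap A
  let M : Int := PySem.List.len uniq
  let poss0 : List (List Int) := (PySem.List.pyRange 0 M).map (fun _ => ([] : List Int))
  let poss := (PySem.List.enumerate B 0).foldl (fun ps p =>
      PySem.List.pySetD ps p.2 (PySem.List.pyGetD ps p.2 [] ++ [p.1])) poss0
  let ans0 : Int := (PySem.List.max? (poss.map (fun p => PySem.List.len p)) (fun x => x)).getD 0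
  (PySem.List.pyRange 0 M).foldl (fun ans v =>
      let ps := PySem.List.pyGetD poss v []
      let m : Int := PySem.List.len ps
      (PySem.List.pyRange 1 (PySem.Int.floordiv m 2 + 1)).foldl (fun ans k =>
          let l := PySem.List.pyGetD ps (k-1) 0
          let r := PySem.List.pyGetD ps (m-k) 0
          (PySem.List.pyRange 0 M).foldl (fun a u =>
            max a (2*k + pvBl (PySem.List.pyGetD poss u []) r
                       - pvBl (PySem.List.pyGetD poss u []) (l+1))) ans) ans) ans0

-- ===== PRECONDITION & SPEC =====
-- A raises on empty A (max() of an empty sequence, ValueError) and when len(A) > N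
-- (IndexError: the left table has only N columns); exactly those inputs are excluded.
def Pre_solve (N : Int) (A : List Int) : Prop := A ≠ [] ∧ PySem.List.len A ≤ N
instance (N : Int) (A : List Int) : Decidable (Pre_solve N A) := by unfold Pre_solve; infer_instance

def pvWitness_solve : Int × List Int := (3, [1, 2, 1])

def Spec_solve (N : Int) (A : List Int) (out : Int) : Prop := out = solve_alt N A
instance (N : Int) (A : List Int) (out : Int) : Decidable (Spec_solve N A out) := by unfold Spec_solve; infer_instance

-- ===== CLAIM (what is proved, stated in full; the proofs are below) =====
def Claim_equal_solve : Prop := ∀ (N : Int) (A : List Int), Dom_solve N A → Pre_solve N A → Spec_solve N A (solve N A)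

-- ===== LEMMAS AND PROOFS =====

-- ---- abstract quantities of the (shared) remapped list ----
def pvSSet (A : List Int) : List Int := PySem.List.sorted (PySem.Set.ofList A) (fun x => x) false
def pvM (A : List Int) : Int := PySem.List.len (pvSSet A)
-- number of occurrences of u among the first t elements
def pvCnt (L : List Int) (u : Int) (t : Nat) : Int := ((L.take t).count u : Int)
-- occurrence positions of v among the first t elements, in increasing order
def pvPosN (L : List Int) (v : Int) (t : Nat) : List Int :=
  ((PySem.List.enumerate (L.take t) 0).filter (fun p => p.2 == v)).map (fun p => p.1)
def pvPosF (L : List Int) (v : Int) : List Int := pvPosN L v L.length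
def pvLo (L : List Int) (v k : Int) : Int := PySem.List.pyGetD (pvPosF L v) (k-1) 0
def pvHi (L : List Int) (v k : Int) : Int := PySem.List.pyGetD (pvPosF L v) ((L.count v : Int) - k) 0
-- the common candidate value 2k + #occurrences of u strictly between the outer blocks
def pvCand (L : List Int) (v k u : Int) : Int :=
  2*k + (pvCnt L u (pvHi L v k).toNat - pvCnt L u ((pvLo L v k).toNat + 1))
def pvBase (L : List Int) : Int := ((PySem.List.max? (PySem.Dict.counter L).values (fun x => x)).getD 0)
-- the candidate lists the two programs take their running max over
def pvLA (L : List Int) (M : Int) : List Int :=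
  (PySem.List.enumerate L 0).flatMap (fun p =>
    if pvLo L p.2 (pvCnt L p.2 (p.1.toNat + 1)) + 1 < pvHi L p.2 (pvCnt L p.2 (p.1.toNat + 1)) then
      (PySem.List.pyRange 0 M).map (fun u => pvCand L p.2 (pvCnt L p.2 (p.1.toNat + 1)) u)
    else [])
def pvLB (L : List Int) (M : Int) : List Int :=
  (PySem.List.pyRange 0 M).flatMap (fun v =>
    (PySem.List.pyRange 1 (PySem.Int.floordiv (L.count v : Int) 2 + 1)).flatMap (fun k =>
      (PySem.List.pyRange 0 M).map (fun u => pvCand L v k u)))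

-- ---- generic fold/max helpers ----
lemma pvFoldlMaxFlat (l : List Int) (g : Int → List Int) (a : Int) :
    (l.flatMap g).foldl max a = l.foldl (fun acc x => (g x).foldl max acc) a := by
  induction l generalizing a with
  | nil => rfl
  | cons x l ih => simp [List.flatMap_cons, List.foldl_append, ih]
lemma pvFoldlMaxLe (l : List Int) (a b : Int) (h0 : a ≤ b) (h : ∀ x ∈ l, x ≤ b) :
    l.foldl max a ≤ b := by
  rcases PySem.List.foldl_max_mem l a with h1 | h1
  · omega
  · exact h _ h1
-- ---- 2D table helpers ----
def pvShape (t : List (List Int)) (rows cols : Nat) : Prop :=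
  t.length = rows ∧ ∀ r ∈ t, r.length = cols

lemma pvShape_set2 (t : List (List Int)) (rows cols : Nat) (a b x : Int)
    (h : pvShape t rows cols) (ha : 0 ≤ a) (halt : a < (rows : Int)) (hb : 0 ≤ b) :
    pvShape (pvSet2 t a b x) rows cols := by
  obtain ⟨h1, h2⟩ := h
  have hat : a.toNat < t.length := by omega
  unfold pvSet2
  rw [PySem.List.pySetD_of_nonneg _ _ ha, PySem.List.pySetD_of_nonneg _ _ hb,
      PySem.List.pyGetD_of_nonneg _ _ ha]
  refine ⟨by simpa using h1, ?_⟩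
  intro r hr
  rcases List.mem_or_eq_of_mem_set hr with hr | hr
  · exact h2 r hr
  · subst hr
    rw [List.length_set, List.getD_eq_getElem?_getD, List.getElem?_eq_getElem hat]
    exact h2 _ (List.getElem_mem hat)
lemma pvGet2_set2 (t : List (List Int)) (rows cols : Nat) (a b a' b' x : Int)
    (h : pvShape t rows cols)
    (ha : 0 ≤ a) (halt : a < (rows : Int)) (hb : 0 ≤ b) (hblt : b < (cols : Int))
    (ha' : 0 ≤ a') (hb' : 0 ≤ b') :
    pvGet2 (pvSet2 t a b x) a' b' = if a' = a ∧ b' = b then x else pvGet2 t a' b' := by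
  obtain ⟨h1, h2⟩ := h
  have hat : a.toNat < t.length := by omega
  have hrow : (PySem.List.pyGetD t a []).length = cols := by
    rw [PySem.List.pyGetD_of_nonneg _ _ ha, List.getD_eq_getElem?_getD,
        List.getElem?_eq_getElem hat]
    exact h2 _ (List.getElem_mem hat)
  unfold pvGet2 pvSet2
  rw [PySem.List.pySetD_of_nonneg _ _ ha, PySem.List.pySetD_of_nonneg _ _ hb,
      PySem.List.pyGetD_of_nonneg _ _ ha', PySem.List.pyGetD_of_nonneg (i := a') _ _ ha']
  by_cases hae : a' = a
  · subst hae
    rw [List.getD_eq_getElem?_getD (l := t.set _ _), List.getElem?_set,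
        if_pos rfl, if_pos hat, Option.getD_some]
    rw [PySem.List.pyGetD_of_nonneg _ _ hb', PySem.List.pyGetD_of_nonneg _ _ hb']
    by_cases hbe : b' = b
    · subst hbe
      rw [if_pos ⟨rfl, rfl⟩, List.getD_eq_getElem?_getD, List.getElem?_set,
          if_pos rfl, if_pos (by omega), Option.getD_some]
    · rw [if_neg (by tauto), List.getD_eq_getElem?_getD, List.getElem?_set,
          if_neg (by omega), ← List.getD_eq_getElem?_getD,
          PySem.List.pyGetD_of_nonneg (xs := t) (i := a') _ ha']
  · rw [if_neg (by tauto), List.getD_eq_getElem?_getD (l := t.set _ _),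
        List.getElem?_set, if_neg (by omega), ← List.getD_eq_getElem?_getD]
-- ---- remapped values are the ranks 0..M-1 ----
lemma pvRemap_length (A : List Int) : (pvRemap A).length = A.length := by
  simp [pvRemap]
lemma pvM_pos (A : List Int) (hA : A ≠ []) : 1 ≤ pvM A := by
  have h : pvSSet A ≠ [] := by
    intro h
    exact hA ((PySem.List.sorted_eq_nil_iff _ _ _).mp h |> fun h2 => by
      cases A with
      | nil => rfl
      | cons a t => exact absurd ((PySem.Set.mem_ofList (a :: t) a).mpr (by simp)) (by simp [h2]))
  have : 0 < (pvSSet A).length := List.length_pos_iff.mpr h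
  simp only [pvM, PySem.List.len_eq]
  omega
lemma pvDictBound (P : Int → Prop) :
    ∀ (l : List (Int × Int)) (d : PySem.Dict Int Int), (∀ w, P (d.getD w 0)) → (∀ p ∈ l, P p.1) →
      ∀ w, P ((l.foldl (fun d p => d.insert p.2 p.1) d).getD w 0) := by
  intro l
  induction l with
  | nil => intro d hd _ w; exact hd w
  | cons p l ih =>
    intro d hd hl w
    simp only [List.foldl_cons]
    refine ih _ ?_ (fun q hq => hl q (by simp [hq])) w
    intro w'
    rw [PySem.Dict.getD_insert]
    split
    · exact hl p (by simp)
    · exact hd w'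

lemma pvRemap_bound (A : List Int) (hA : A ≠ []) :
    ∀ v ∈ pvRemap A, 0 ≤ v ∧ v < pvM A := by
  intro v hv
  simp only [pvRemap, List.mem_map] at hv
  obtain ⟨w, _, rfl⟩ := hv
  refine pvDictBound (fun x => 0 ≤ x ∧ x < pvM A) _ _ ?_ ?_ w
  · intro w'
    have h0 : (PySem.Dict.empty : PySem.Dict Int Int).getD w' 0 = 0 := rfl
    have h1 := pvM_pos A hA
    rw [h0]
    exact ⟨le_refl 0, by omega⟩
  · intro p hp
    rw [PySem.List.mem_enumerate_iff] at hp
    obtain ⟨k, hk, rfl⟩ := hp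
    simp only [pvM, pvSSet, PySem.List.len_eq]
    constructor <;> omega
-- ---- position lists ----
lemma pvPosN_zero (L : List Int) (v : Int) : pvPosN L v 0 = [] := rfl
lemma pvPosN_succ (L : List Int) (v : Int) (t : Nat) (ht : t < L.length) :
    pvPosN L v (t+1) = pvPosN L v t ++ (if L[t] = v then [(t : Int)] else []) := by
  unfold pvPosN
  rw [List.take_add_one, List.getElem?_eq_getElem ht]
  simp only [Option.toList_some]
  rw [PySem.List.enumerate_append, List.filter_append, List.map_append,
      List.length_take_of_le (le_of_lt ht)]
  congr 1
  by_cases h : L[t] = v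
  · simp [PySem.List.enumerate, h]
  · simp [PySem.List.enumerate, h]
lemma pvPosN_length (L : List Int) (v : Int) (t : Nat) (ht : t ≤ L.length) :
    (pvPosN L v t).length = (L.take t).count v := by
  induction t with
  | zero => simp [pvPosN_zero]
  | succ m ih =>
    have hm : m < L.length := by omega
    rw [pvPosN_succ L v m hm, List.take_add_one, List.getElem?_eq_getElem hm]
    simp only [Option.toList_some, List.length_append, List.count_append,
      ih (le_of_lt hm)]
    by_cases h : L[m] = v
    · simp [h]
    · simp [h]
lemma pvPosF_length (L : List Int) (v : Int) : (pvPosF L v).length = L.count v := by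
  unfold pvPosF
  rw [pvPosN_length L v L.length (le_refl _), List.take_length]
lemma pvPosN_prefix (L : List Int) (v : Int) (t t₂ : Nat) (h : t ≤ t₂) (h2 : t₂ ≤ L.length) :
    pvPosN L v t <+: pvPosN L v t₂ := by
  induction t₂ with
  | zero => rw [Nat.le_zero.mp h]
  | succ m ih =>
    rcases Nat.lt_or_ge t (m+1) with hlt | hge
    · have := ih (by omega) (by omega)
      rw [pvPosN_succ L v m (by omega)]
      exact this.trans (List.prefix_append _ _)
    · have : t = m + 1 := by omega
      subst this
      exact List.prefix_refl _
lemma pvPosF_pairwise (L : List Int) (v : Int) :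
    (pvPosF L v).Pairwise (· < ·) := by
  unfold pvPosF pvPosN
  rw [List.pairwise_map]
  exact (PySem.List.pairwise_lt_enumerate _ _).filter _
-- forward: the (count before i + 1)-th occurrence of v is at index i
lemma pvPosF_getElem_of_idx (L : List Int) (v : Int) (i : Nat) (hi : i < L.length) (hv : L[i] = v) :
    ∃ (hk : (L.take i).count v < (pvPosF L v).length), (pvPosF L v)[(L.take i).count v] = (i : Int) := by
  have hsucc := pvPosN_succ L v i hi
  rw [if_pos hv] at hsucc
  have hlen : (pvPosN L v i).length = (L.take i).count v := pvPosN_length L v i (le_of_lt hi)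
  have hpre : pvPosN L v (i+1) <+: pvPosF L v := pvPosN_prefix L v (i+1) L.length (by omega) (le_refl _)
  have hlt : (L.take i).count v < (pvPosN L v (i+1)).length := by
    rw [hsucc, List.length_append, hlen]; simp
  have hlt2 : (L.take i).count v < (pvPosF L v).length :=
    lt_of_lt_of_le hlt (List.IsPrefix.length_le hpre)
  refine ⟨hlt2, ?_⟩
  obtain ⟨tl, htl⟩ := hpre
  have heq : pvPosF L v = (pvPosN L v i ++ [(i:Int)]) ++ tl := by rw [← htl, hsucc]
  rw [List.getElem_of_eq heq]
  rw [List.getElem_append_left (by rw [List.length_append, hlen]; simp)]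
  exact List.getElem_concat_length (by omega) _
-- backward: the k-th entry of the position list is a genuine index with that occurrence count
lemma pvPosF_getElem_char (L : List Int) (v : Int) (k : Nat) (hk : k < (pvPosF L v).length) :
    ∃ (i : Nat) (hi : i < L.length), (pvPosF L v)[k] = (i : Int) ∧ L[i] = v ∧ (L.take i).count v = k := by
  have heq : pvPosF L v = ((PySem.List.enumerate L 0).filter (fun p => p.2 == v)).map (fun p => p.1) := by
    unfold pvPosF pvPosN
    rw [List.take_length]
  obtain ⟨x, hx⟩ : ∃ x, (pvPosF L v)[k] = x := ⟨_, rfl⟩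
  have hmem : x ∈ pvPosF L v := hx ▸ List.getElem_mem hk
  rw [heq, List.mem_map] at hmem
  obtain ⟨p, hp, hpx⟩ := hmem
  rw [List.mem_filter] at hp
  obtain ⟨hp1, hp2⟩ := hp
  rw [PySem.List.mem_enumerate_iff] at hp1
  obtain ⟨i, hi, rfl⟩ := hp1
  simp only [beq_iff_eq] at hp2
  have hxi : x = (i : Int) := by simpa using hpx.symm
  subst hxi
  refine ⟨i, hi, hx, hp2, ?_⟩
  obtain ⟨hk2, hg⟩ := pvPosF_getElem_of_idx L v i hi hp2
  have hnd : (pvPosF L v).Nodup :=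
    (pvPosF_pairwise L v).imp (fun h => ne_of_lt h)
  have heq2 : (pvPosF L v)[k] = (pvPosF L v)[(L.take i).count v] := by rw [hg, hx]
  exact ((hnd.getElem_inj_iff).mp heq2).symm
-- ---- base value ----
-- lo/hi basic facts, for 1 ≤ k ≤ count v L
lemma pvLo_spec (L : List Int) (v k : Int) (hk1 : 1 ≤ k) (hk2 : k ≤ (L.count v : Int)) :
    ∃ (i : Nat) (hi : i < L.length), pvLo L v k = (i : Int) ∧ L[i] = v ∧ ((L.take i).count v : Int) = k - 1 := by
  have hlen := pvPosF_length L v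
  have hlt : (k-1).toNat < (pvPosF L v).length := by omega
  obtain ⟨i, hi, hgl, hlv, hcnt⟩ := pvPosF_getElem_char L v (k-1).toNat hlt
  refine ⟨i, hi, ?_, hlv, by omega⟩
  unfold pvLo
  rw [PySem.List.pyGetD_of_nonneg _ _ (by omega), List.getD_eq_getElem?_getD,
      List.getElem?_eq_getElem hlt, Option.getD_some, hgl]
lemma pvHi_spec (L : List Int) (v k : Int) (hk1 : 1 ≤ k) (hk2 : k ≤ (L.count v : Int)) :
    ∃ (i : Nat) (hi : i < L.length), pvHi L v k = (i : Int) ∧ L[i] = v ∧ ((L.take i).count v : Int) = (L.count v : Int) - k := by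
  have hlen := pvPosF_length L v
  have hlt : ((L.count v : Int) - k).toNat < (pvPosF L v).length := by omega
  obtain ⟨i, hi, hgl, hlv, hcnt⟩ := pvPosF_getElem_char L v _ hlt
  refine ⟨i, hi, ?_, hlv, by omega⟩
  unfold pvHi
  rw [PySem.List.pyGetD_of_nonneg _ _ (by omega), List.getD_eq_getElem?_getD,
      List.getElem?_eq_getElem hlt, Option.getD_some, hgl]
-- the condition i < j of A holds only for k ≤ m // 2, and lo < hi whenever k ≤ m // 2
lemma pvLo_lt_pvHi (L : List Int) (v k : Int) (hk1 : 1 ≤ k)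
    (hk2 : 2*k ≤ (L.count v : Int)) : pvLo L v k < pvHi L v k := by
  have hlen := pvPosF_length L v
  have h1 : (k-1).toNat < (pvPosF L v).length := by omega
  have h2 : ((L.count v : Int) - k).toNat < (pvPosF L v).length := by omega
  have hmono := List.pairwise_iff_getElem.mp (pvPosF_pairwise L v) (k-1).toNat
    ((L.count v : Int) - k).toNat h1 h2 (by omega)
  unfold pvLo pvHi
  rw [PySem.List.pyGetD_of_nonneg _ _ (by omega), PySem.List.pyGetD_of_nonneg _ _ (by omega),
      List.getD_eq_getElem?_getD, List.getElem?_eq_getElem h1, Option.getD_some,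
      List.getD_eq_getElem?_getD, List.getElem?_eq_getElem h2, Option.getD_some]
  exact hmono
lemma pvPosF_mono (L : List Int) (v : Int) (i j : Nat) (hij : i ≤ j) (hj : j < (pvPosF L v).length) :
    (pvPosF L v)[i]'(lt_of_le_of_lt hij hj) ≤ (pvPosF L v)[j] := by
  rcases Nat.eq_or_lt_of_le hij with rfl | hlt
  · exact le_refl _
  · exact le_of_lt (List.pairwise_iff_getElem.mp (pvPosF_pairwise L v) _ _ _ hj hlt)

lemma pvCond_le_half (L : List Int) (v k : Int) (hk1 : 1 ≤ k) (hk2 : k ≤ (L.count v : Int))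
    (hc : pvLo L v k + 1 < pvHi L v k) : 2*k ≤ (L.count v : Int) := by
  by_contra hcon
  have hlen := pvPosF_length L v
  have h1 : (k-1).toNat < (pvPosF L v).length := by omega
  have h2 : ((L.count v : Int) - k).toNat < (pvPosF L v).length := by omega
  have hge : ((L.count v : Int) - k).toNat ≤ (k-1).toNat := by omega
  have hmono : (pvPosF L v)[((L.count v : Int) - k).toNat]'h2 ≤ (pvPosF L v)[(k-1).toNat] :=
    pvPosF_mono L v _ _ hge h1
  have hlo : pvLo L v k = (pvPosF L v)[(k-1).toNat] := by
    unfold pvLo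
    rw [PySem.List.pyGetD_of_nonneg _ _ (by omega), List.getD_eq_getElem?_getD,
        List.getElem?_eq_getElem h1, Option.getD_some]
  have hhi : pvHi L v k = (pvPosF L v)[((L.count v : Int) - k).toNat] := by
    unfold pvHi
    rw [PySem.List.pyGetD_of_nonneg _ _ (by omega), List.getD_eq_getElem?_getD,
        List.getElem?_eq_getElem h2, Option.getD_some]
  omega
-- ---- B-side: poss characterization ----
def pvPossB (L : List Int) (M : Int) : List (List Int) :=
  (PySem.List.enumerate L 0).foldl (fun ps p =>
      PySem.List.pySetD ps p.2 (PySem.List.pyGetD ps p.2 [] ++ [p.1]))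
    ((PySem.List.pyRange 0 M).map (fun _ => ([] : List Int)))

lemma pvEnumTake (L : List Int) (t : Nat) (ht : t < L.length) :
    PySem.List.enumerate (L.take (t+1)) 0
      = PySem.List.enumerate (L.take t) 0 ++ [((t : Int), L[t])] := by
  rw [List.take_add_one, List.getElem?_eq_getElem ht]
  simp only [Option.toList_some]
  rw [PySem.List.enumerate_append, List.length_take_of_le (le_of_lt ht)]
  simp [PySem.List.enumerate]

lemma pvPossB_aux (L : List Int) (M : Int) (hb : ∀ v ∈ L, 0 ≤ v ∧ v < M) :
    ∀ t, t ≤ L.length →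
      (PySem.List.enumerate (L.take t) 0).foldl (fun ps p =>
          PySem.List.pySetD ps p.2 (PySem.List.pyGetD ps p.2 [] ++ [p.1]))
        ((PySem.List.pyRange 0 M).map (fun _ => ([] : List Int)))
      = (PySem.List.pyRange 0 M).map (fun v => pvPosN L v t) := by
  intro t
  induction t with
  | zero =>
    intro _
    simp [pvPosN_zero]
  | succ m ih =>
    intro hm1
    have hm : m < L.length := by omega
    rw [pvEnumTake L m hm, List.foldl_append, ih (le_of_lt hm)]
    simp only [List.foldl_cons, List.foldl_nil]
    have hv := hb L[m] (List.getElem_mem hm)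
    have hget : PySem.List.pyGetD ((PySem.List.pyRange 0 M).map (fun v => pvPosN L v m)) L[m] []
        = pvPosN L L[m] m :=
      PySem.List.pyGetD_map_pyRange_of_nonneg _ M L[m] [] hv.1 hv.2
    rw [hget, PySem.List.pySetD_of_nonneg _ _ hv.1]
    apply List.ext_getElem
    · simp
    · intro q hq1 hq2
      rw [List.length_set, List.length_map, PySem.List.length_pyRange_one] at hq1
      have hq1' : (q : Int) < M := by omega
      have hget2 : ∀ (tt : Nat), ((PySem.List.pyRange 0 M).map (fun v => pvPosN L v tt))[q]'(by
          rw [List.length_map, PySem.List.length_pyRange_one]; omega) = pvPosN L (q : Int) tt := by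
        intro tt
        rw [List.getElem_map, PySem.List.getElem_pyRange_one]
        norm_num
      rw [List.getElem_set, hget2 (m+1)]
      by_cases hqv : L[m].toNat = q
      · rw [if_pos hqv]
        have hq : (q : Int) = L[m] := by omega
        rw [hq, pvPosN_succ L L[m] m hm, if_pos rfl]
      · rw [if_neg hqv, hget2 m, pvPosN_succ L (q : Int) m hm, if_neg (by omega), List.append_nil]

lemma pvPossB_eq (L : List Int) (M : Int) (hb : ∀ v ∈ L, 0 ≤ v ∧ v < M) :
    pvPossB L M = (PySem.List.pyRange 0 M).map (fun v => pvPosF L v) := by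
  have := pvPossB_aux L M hb L.length (le_refl _)
  rw [List.take_length] at this
  exact this

-- ---- B-side: the binary search counts elements below the threshold ----
lemma pvBlGo_eq (ps : List Int) (x : Int)
    (hmono : ∀ m : Nat, (hm : m < ps.length) →
      (ps[m] < x ↔ (m : Int) < (ps.countP (fun p => decide (p < x)) : Int))) :
    ∀ (d : Nat) (lo hi : Int), (hi - lo).toNat ≤ d →
      0 ≤ lo → lo ≤ (ps.countP (fun p => decide (p < x)) : Int) →
      (ps.countP (fun p => decide (p < x)) : Int) ≤ hi → hi ≤ (ps.length : Int) →
      pvBlGo ps x d lo hi = (ps.countP (fun p => decide (p < x)) : Int) := by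
  intro d
  induction d with
  | zero =>
    intro lo hi hd h0 h1 h2 h3
    rw [pvBlGo]
    omega
  | succ d ihd =>
    intro lo hi hd h0 h1 h2 h3
    by_cases hlh : lo < hi
    case neg =>
      rw [pvBlGo, if_neg hlh]
      omega
    case pos =>
      rw [pvBlGo, if_pos hlh]
      have hfd := PySem.Int.floordiv_eq_ediv_of_pos (a := lo + hi) (show (0:Int) < 2 by norm_num)
      set mid := PySem.Int.floordiv (lo + hi) 2 with hmid
      have hb1 : lo ≤ mid := by omega
      have hb2 : mid < hi := by omega
      have hmt : (mid.toNat : Int) = mid := by omega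
      have hmlt : mid.toNat < ps.length := by omega
      have hget : PySem.List.pyGetD ps mid 0 = ps[mid.toNat] := by
        rw [PySem.List.pyGetD_of_nonneg _ _ (by omega), List.getD_eq_getElem?_getD,
            List.getElem?_eq_getElem hmlt, Option.getD_some]
      have hiff := hmono mid.toNat hmlt
      by_cases hc : PySem.List.pyGetD ps mid 0 < x
      · rw [if_pos hc]
        have hlt : (mid.toNat : Int) < (ps.countP (fun p => decide (p < x)) : Int) := by
          rw [← hiff, ← hget]; exact hc
        exact ihd (mid+1) hi (by omega) (by omega) (by omega) h2 h3
      · rw [if_neg hc]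
        have hnlt : ¬ ps[mid.toNat] < x := by rw [← hget]; exact hc
        have hle : (ps.countP (fun p => decide (p < x)) : Int) ≤ mid := by
          by_contra hcon
          exact hnlt (hiff.mpr (by omega))
        exact ihd lo mid (by omega) h0 h1 hle (by omega)

lemma pvSorted_mono (ps : List Int) (x : Int) (hs : ps.Pairwise (· < ·)) :
    ∀ m : Nat, (hm : m < ps.length) →
      (ps[m] < x ↔ (m : Int) < (ps.countP (fun p => decide (p < x)) : Int)) := by
  intro m hm
  have hsplit : ps = ps.take m ++ ps.drop m := (List.take_append_drop m ps).symm
  have hdrop : ps.drop m = ps[m] :: ps.drop (m+1) := (List.drop_eq_getElem_cons hm)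
  have hcnt : ps.countP (fun p => decide (p < x))
      = (ps.take m).countP (fun p => decide (p < x))
        + (ps.drop m).countP (fun p => decide (p < x)) := by
    conv_lhs => rw [hsplit]
    rw [List.countP_append]
  have hpg := List.pairwise_iff_getElem.mp hs
  constructor
  · intro hlt
    -- every element of take (m) is < ps[m] < x, and ps[m] < x
    have htk : (ps.take m).countP (fun p => decide (p < x)) = m := by
      rw [List.countP_eq_length.mpr, List.length_take_of_le (le_of_lt hm)]
      intro a ha
      rw [List.mem_take_iff_getElem] at ha
      obtain ⟨i, hi, rfl⟩ := ha
      have : ps[i] < ps[m] := hpg i m (by omega) hm (by omega)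
      simp only [decide_eq_true_eq]
      omega
    have hdc : 1 ≤ (ps.drop m).countP (fun p => decide (p < x)) := by
      rw [hdrop, List.countP_cons, if_pos (by simpa using hlt)]
      omega
    omega
  · intro hlt
    by_contra hge
    -- every element of drop m is ≥ ps[m] ≥ x
    have hdz : (ps.drop m).countP (fun p => decide (p < x)) = 0 := by
      rw [List.countP_eq_zero]
      intro a ha
      rw [List.mem_iff_getElem] at ha
      obtain ⟨i, hi, rfl⟩ := ha
      have hdl : (ps.drop m).length = ps.length - m := by simp
      rw [List.getElem_drop] at *
      have hle : ps[m] ≤ ps[m + i]'(by omega) := by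
        rcases Nat.eq_zero_or_pos i with rfl | hpos
        · simp
        · exact le_of_lt (hpg m (m+i) hm (by omega) (by omega))
      simp only [decide_eq_true_eq]
      omega
    have htk : (ps.take m).countP (fun p => decide (p < x)) ≤ m := by
      calc _ ≤ (ps.take m).length := List.countP_le_length
        _ ≤ m := List.length_take_le _ _
    omega

lemma pvBl_count (L : List Int) (u t : Int) (h0 : 0 ≤ t) (ht : t ≤ (L.length : Int)) :
    pvBl (pvPosF L u) t = pvCnt L u t.toNat := by
  have hmono := pvSorted_mono (pvPosF L u) t (pvPosF_pairwise L u)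
  have hcle : (pvPosF L u).countP (fun p => decide (p < t)) ≤ (pvPosF L u).length :=
    List.countP_le_length
  have hbl : pvBl (pvPosF L u) t = ((pvPosF L u).countP (fun p => decide (p < t)) : Int) := by
    unfold pvBl
    rw [PySem.List.len_eq]
    exact pvBlGo_eq (pvPosF L u) t hmono ((pvPosF L u).length : Int).toNat 0 _
      (by omega) (le_refl 0) (by positivity) (by exact_mod_cast hcle) (by omega)
  rw [hbl]
  -- countP (· < t) on the full position list = count of u among the first t elements
  have key : ∀ s, s ≤ L.length →
      (pvPosN L u s).countP (fun p => decide (p < t)) = (L.take (min t.toNat s)).count u := by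
    intro s
    induction s with
    | zero => simp [pvPosN_zero]
    | succ m ih =>
      intro hm1
      have hm : m < L.length := by omega
      rw [pvPosN_succ L u m hm, List.countP_append, ih (le_of_lt hm)]
      by_cases hv : L[m] = u
      · rw [if_pos hv]
        by_cases hmt : (m : Int) < t
        · have e1 : min t.toNat (m+1) = min t.toNat m + 1 := by omega
          have e2 : min t.toNat m = m := by omega
          rw [e1, e2, List.take_add_one, List.getElem?_eq_getElem hm]
          simp [hv, hmt, List.count_append]
        · have e1 : min t.toNat (m+1) = min t.toNat m := by omega
          simp [e1, hmt]
      · rw [if_neg hv]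
        by_cases hmt : (m : Int) < t
        · have e1 : min t.toNat (m+1) = min t.toNat m + 1 := by omega
          have e2 : min t.toNat m = m := by omega
          have hstep : (L.take (m+1)).count u = (L.take m).count u := by
            rw [List.take_add_one, List.getElem?_eq_getElem hm]
            simp only [Option.toList_some, List.count_append]
            have hone : List.count u [L[m]] = 0 :=
              List.count_eq_zero.mpr (by simp; exact fun h => hv h.symm)
            omega
          rw [e1, e2, hstep]
          simp
        · have e1 : min t.toNat (m+1) = min t.toNat m := by omega
          simp [e1]
  have hfin := key L.length (le_refl _)
  have hmin : min t.toNat L.length = t.toNat := by omega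
  rw [hmin] at hfin
  unfold pvCnt
  unfold pvPosF
  exact_mod_cast hfin

-- the value B folds max over, abstracted
def pvAnsB (L : List Int) (M : Int) : Int :=
  (PySem.List.pyRange 0 M).foldl (fun ans v =>
      (PySem.List.pyRange 1 (PySem.Int.floordiv (PySem.List.len (PySem.List.pyGetD (pvPossB L M) v [])) 2 + 1)).foldl (fun ans k =>
          (PySem.List.pyRange 0 M).foldl (fun a u =>
            max a (2*k + pvBl (PySem.List.pyGetD (pvPossB L M) u [])
                     (PySem.List.pyGetD (PySem.List.pyGetD (pvPossB L M) v []) ((PySem.List.len (PySem.List.pyGetD (pvPossB L M) v [])) - k) 0)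
                       - pvBl (PySem.List.pyGetD (pvPossB L M) u [])
                     ((PySem.List.pyGetD (PySem.List.pyGetD (pvPossB L M) v []) (k-1) 0) + 1))) ans) ans)
    ((PySem.List.max? ((pvPossB L M).map (fun p => PySem.List.len p)) (fun x => x)).getD 0)

lemma pvAnsB_unfold (N : Int) (A : List Int) : solve_alt N A = pvAnsB (pvRemap A) (pvM A) := rfl

-- ---- base value facts ----
lemma pvBase_mem (L : List Int) (hL : L ≠ []) :
    ∃ k, k ∈ L ∧ pvBase L = (L.count k : Int) := by
  have hkeys := PySem.Dict.keys_counter L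
  have hvals : (PySem.Dict.counter L).values =
      (PySem.Set.ofList L).map (fun k => ((L.count k : Nat) : Int)) := by
    rw [PySem.Dict.values_eq_map_keys _ (PySem.Dict.nodup_keys_counter L) 0, hkeys]
    exact List.map_congr_left (fun k _ => PySem.Dict.getD_counter L k)
  have hne : (PySem.Dict.counter L).values ≠ [] := by
    rw [hvals]
    intro h
    have h2 := List.map_eq_nil_iff.mp h
    rcases List.exists_mem_of_ne_nil L hL with ⟨a, ha⟩
    have : a ∈ PySem.Set.ofList L := (PySem.Set.mem_ofList _ _).mpr ha
    rw [h2] at this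
    exact absurd this (by simp)
  obtain ⟨m, hm⟩ : ∃ m, PySem.List.max? (PySem.Dict.counter L).values (fun x => x) = some m := by
    cases hmx : PySem.List.max? (PySem.Dict.counter L).values (fun x => x) with
    | none => exact absurd ((PySem.List.max?_eq_none_iff _ _).mp hmx) hne
    | some m => exact ⟨m, rfl⟩
  have hmm := PySem.List.max?_mem hm
  rw [hvals, List.mem_map] at hmm
  obtain ⟨kk, hk, hke⟩ := hmm
  refine ⟨kk, (PySem.Set.mem_ofList _ _).mp hk, ?_⟩
  unfold pvBase
  rw [hm, Option.getD_some, ← hke]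

lemma pvCount_le_base' (L : List Int) (hL : L ≠ []) (v : Int) :
    ((L.count v : Int)) ≤ pvBase L := by
  have hkeys := PySem.Dict.keys_counter L
  have hvals : (PySem.Dict.counter L).values =
      (PySem.Set.ofList L).map (fun k => ((L.count k : Nat) : Int)) := by
    rw [PySem.Dict.values_eq_map_keys _ (PySem.Dict.nodup_keys_counter L) 0, hkeys]
    exact List.map_congr_left (fun k _ => PySem.Dict.getD_counter L k)
  obtain ⟨k0, hk0, hbe⟩ := pvBase_mem L hL
  by_cases hv : v ∈ L
  · obtain ⟨m, hm⟩ : ∃ m, PySem.List.max? (PySem.Dict.counter L).values (fun x => x) = some m := by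
      cases hmx : PySem.List.max? (PySem.Dict.counter L).values (fun x => x) with
      | none =>
        rw [(PySem.List.max?_eq_none_iff _ _).mp hmx] at hvals
        rcases List.exists_mem_of_ne_nil L hL with ⟨a, ha⟩
        have : a ∈ PySem.Set.ofList L := (PySem.Set.mem_ofList _ _).mpr ha
        rw [List.map_eq_nil_iff.mp hvals.symm] at this
        exact absurd this (by simp)
      | some m => exact ⟨m, rfl⟩
    have hmax := PySem.List.max?_isMax hm
    have : ((L.count v : Nat) : Int) ∈ (PySem.Dict.counter L).values := by
      rw [hvals, List.mem_map]
      exact ⟨v, (PySem.Set.mem_ofList _ _).mpr hv, rfl⟩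
    have := hmax _ this
    unfold pvBase
    rw [hm, Option.getD_some]
    exact this
  · have h0 : L.count v = 0 := List.count_eq_zero.mpr hv
    rw [hbe, h0]
    positivity

lemma pvBaseB_eq (L : List Int) (M : Int) (hL : L ≠ []) (hb : ∀ v ∈ L, 0 ≤ v ∧ v < M) :
    (PySem.List.max? (((PySem.List.pyRange 0 M).map (fun v => pvPosF L v)).map
        (fun p => PySem.List.len p)) (fun x => x)).getD 0 = pvBase L := by
  have hlist : ((PySem.List.pyRange 0 M).map (fun v => pvPosF L v)).map
        (fun p => PySem.List.len p)
      = (PySem.List.pyRange 0 M).map (fun v => (L.count v : Int)) := by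
    rw [List.map_map]
    apply List.map_congr_left
    intro v _
    simp [PySem.List.len_eq, pvPosF_length]
  rw [hlist]
  have hM : 1 ≤ M := by
    rcases List.exists_mem_of_ne_nil L hL with ⟨a, ha⟩
    have := hb a ha
    omega
  have hne : (PySem.List.pyRange 0 M).map (fun v => (L.count v : Int)) ≠ [] := by
    intro h
    have := List.map_eq_nil_iff.mp h
    have h2 : (PySem.List.pyRange 0 M).length = (M - 0).toNat := PySem.List.length_pyRange_one 0 M
    rw [this] at h2
    simp at h2
    omega
  obtain ⟨m2, hm2⟩ : ∃ m, PySem.List.max? ((PySem.List.pyRange 0 M).map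
      (fun v => (L.count v : Int))) (fun x => x) = some m := by
    cases hmx : PySem.List.max? ((PySem.List.pyRange 0 M).map (fun v => (L.count v : Int))) (fun x => x) with
    | none => exact absurd ((PySem.List.max?_eq_none_iff _ _).mp hmx) hne
    | some m => exact ⟨m, rfl⟩
  rw [hm2, Option.getD_some]
  apply le_antisymm
  · have hmm := PySem.List.max?_mem hm2
    rw [List.mem_map] at hmm
    obtain ⟨v, _, rfl⟩ := hmm
    exact pvCount_le_base' L hL v
  · obtain ⟨k0, hk0, hbe⟩ := pvBase_mem L hL
    rw [hbe]
    refine PySem.List.max?_isMax hm2 _ ?_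
    rw [List.mem_map]
    exact ⟨k0, PySem.List.mem_pyRange_one.mpr ⟨(hb k0 hk0).1, (hb k0 hk0).2⟩, rfl⟩

lemma pvAnsB_eq (L : List Int) (M : Int) (hL : L ≠ []) (hb : ∀ v ∈ L, 0 ≤ v ∧ v < M) :
    pvAnsB L M = (pvLB L M).foldl max (pvBase L) := by
  unfold pvAnsB
  rw [pvPossB_eq L M hb, pvBaseB_eq L M hL hb]
  unfold pvLB
  rw [pvFoldlMaxFlat]
  apply PySem.List.foldl_congr_mem
  intro acc v hv
  obtain ⟨hv1, hv2⟩ := PySem.List.mem_pyRange_one.mp hv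
  rw [PySem.List.pyGetD_map_pyRange_of_nonneg (fun v => pvPosF L v) M v [] hv1 hv2]
  have hlen : PySem.List.len (pvPosF L v) = ((L.count v : Nat) : Int) := by
    simp [PySem.List.len_eq, pvPosF_length]
  rw [hlen, pvFoldlMaxFlat]
  apply PySem.List.foldl_congr_mem
  intro acc2 k hk
  obtain ⟨hk1, hk2⟩ := PySem.List.mem_pyRange_one.mp hk
  have h2k : 2*k ≤ ((L.count v : Nat) : Int) := by
    have hkf : k ≤ PySem.Int.floordiv ((L.count v : Nat) : Int) 2 := by omega
    have := (PySem.Int.le_floordiv_iff_mul_le (show (0:Int) < 2 by norm_num)).mp hkf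
    omega
  have hkc : k ≤ ((L.count v : Nat) : Int) := by omega
  obtain ⟨ih, hih, hhi_eq, _, _⟩ := pvHi_spec L v k hk1 hkc
  obtain ⟨il, hil, hlo_eq, _, _⟩ := pvLo_spec L v k hk1 hkc
  rw [List.foldl_map]
  apply PySem.List.foldl_congr_mem
  intro a u hu
  obtain ⟨hu1, hu2⟩ := PySem.List.mem_pyRange_one.mp hu
  have hhiB : (0:Int) ≤ pvHi L v k ∧ pvHi L v k ≤ (L.length : Int) := by
    rw [hhi_eq]; constructor <;> [positivity; exact_mod_cast le_of_lt hih]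
  have hloB : (0:Int) ≤ pvLo L v k ∧ pvLo L v k < (L.length : Int) := by
    rw [hlo_eq]; constructor <;> [positivity; exact_mod_cast hil]
  have e1 : PySem.List.pyGetD (pvPosF L v) (((L.count v : Nat) : Int) - k) 0 = pvHi L v k := rfl
  have e2 : PySem.List.pyGetD (pvPosF L v) (k-1) 0 = pvLo L v k := rfl
  rw [e1, e2,
      PySem.List.pyGetD_map_pyRange_of_nonneg (fun v => pvPosF L v) M u [] hu1 hu2,
      pvBl_count L u (pvHi L v k) hhiB.1 hhiB.2,
      pvBl_count L u (pvLo L v k + 1) (by omega) (by omega)]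
  have e3 : (pvLo L v k + 1).toNat = (pvLo L v k).toNat + 1 := by omega
  rw [e3]
  unfold pvCand
  ring_nf

lemma pvCnt_take_succ (L : List Int) (v : Int) (i : Nat) (hi : i < L.length) :
    (L.take (i+1)).count v = (L.take i).count v + (if L[i] = v then 1 else 0) := by
  rw [List.take_add_one, List.getElem?_eq_getElem hi]
  simp only [Option.toList_some, List.count_append]
  by_cases h : L[i] = v <;> simp [h]

lemma pvK_pos (L : List Int) (i : Nat) (hi : i < L.length) :
    1 ≤ pvCnt L (L[i]) (i+1) := by
  unfold pvCnt
  have : (L.take (i+1)).count L[i] ≥ 1 := by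
    rw [pvCnt_take_succ L _ i hi, if_pos rfl]
    omega
  omega

lemma pvK_le (L : List Int) (v : Int) (t : Nat) : pvCnt L v t ≤ (L.count v : Int) := by
  unfold pvCnt
  exact_mod_cast (List.take_sublist t L).count_le v

-- every candidate of A's list is also one of B's
lemma pvLA_subset (L : List Int) (M : Int) (hb : ∀ v ∈ L, 0 ≤ v ∧ v < M) (x : Int)
    (hx : x ∈ pvLA L M) : x ∈ pvLB L M := by
  unfold pvLA at hx
  rw [List.mem_flatMap] at hx
  obtain ⟨p, hp, hx⟩ := hx
  rw [PySem.List.mem_enumerate_iff] at hp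
  obtain ⟨i, hi, rfl⟩ := hp
  simp only [zero_add] at hx
  by_cases hc : pvLo L L[i] (pvCnt L L[i] ((i:Int).toNat + 1)) + 1
      < pvHi L L[i] (pvCnt L L[i] ((i:Int).toNat + 1)) 
  · rw [if_pos hc, List.mem_map] at hx
    obtain ⟨u, hu, rfl⟩ := hx
    have hit : ((i:Int)).toNat = i := by omega
    rw [hit] at hc ⊢
    set k := pvCnt L L[i] (i + 1) with hk
    have hk1 : 1 ≤ k := pvK_pos L i hi
    have hkc : k ≤ (L.count L[i] : Int) := pvK_le L L[i] (i+1)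
    have h2k := pvCond_le_half L L[i] k hk1 hkc hc
    unfold pvLB
    rw [List.mem_flatMap]
    refine ⟨L[i], ?_, ?_⟩
    · rw [PySem.List.mem_pyRange_one]
      exact ⟨(hb _ (List.getElem_mem hi)).1, (hb _ (List.getElem_mem hi)).2⟩
    · rw [List.mem_flatMap]
      refine ⟨k, ?_, ?_⟩
      · rw [PySem.List.mem_pyRange_one]
        refine ⟨hk1, ?_⟩
        have : k ≤ PySem.Int.floordiv ((L.count L[i] : Nat) : Int) 2 :=
          (PySem.Int.le_floordiv_iff_mul_le (show (0:Int) < 2 by norm_num)).mpr (by omega)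
        omega
      · rw [List.mem_map]
        exact ⟨u, hu, rfl⟩
  · rw [if_neg hc] at hx
    exact absurd hx (List.not_mem_nil)

lemma pvLB_le (L : List Int) (M : Int) (hL : L ≠ []) (x : Int) (hx : x ∈ pvLB L M) :
    x ≤ (pvLA L M).foldl max (pvBase L) := by
  unfold pvLB at hx
  rw [List.mem_flatMap] at hx
  obtain ⟨v, hv, hx⟩ := hx
  rw [List.mem_flatMap] at hx
  obtain ⟨k, hk, hx⟩ := hx
  rw [List.mem_map] at hx
  obtain ⟨u, hu, rfl⟩ := hx
  obtain ⟨hk1, hk2⟩ := PySem.List.mem_pyRange_one.mp hk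
  have h2k : 2*k ≤ ((L.count v : Nat) : Int) := by
    have hkf : k ≤ PySem.Int.floordiv ((L.count v : Nat) : Int) 2 := by omega
    have := (PySem.Int.le_floordiv_iff_mul_le (show (0:Int) < 2 by norm_num)).mp hkf
    omega
  have hkc : k ≤ ((L.count v : Nat) : Int) := by omega
  obtain ⟨il, hil, hlo_eq, hlv, hlcnt⟩ := pvLo_spec L v k hk1 hkc
  obtain ⟨ih, hih, hhi_eq, _, _⟩ := pvHi_spec L v k hk1 hkc
  by_cases hc : pvLo L v k + 1 < pvHi L v k
  · -- the candidate also appears in A's list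
    have hkeq : pvCnt L v (il + 1) = k := by
      unfold pvCnt
      rw [pvCnt_take_succ L v il hil, if_pos hlv]
      push_cast
      omega
    refine (PySem.List.le_foldl_max _ _).2 _ ?_
    unfold pvLA
    rw [List.mem_flatMap]
    refine ⟨((il : Int), L[il]), PySem.List.mem_enumerate_iff _ _ _ |>.mpr ⟨il, hil, by simp⟩, ?_⟩
    simp only [Int.toNat_natCast, hlv, hkeq]
    rw [if_pos hc, List.mem_map]
    exact ⟨u, hu, rfl⟩
  · -- adjacent outer blocks: the candidate is just 2k ≤ the best single-block count
    have hlt : pvLo L v k < pvHi L v k := pvLo_lt_pvHi L v k hk1 h2k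
    have heq : pvHi L v k = pvLo L v k + 1 := by omega
    have hx2 : pvCand L v k u = 2*k := by
      unfold pvCand
      have h0 : (0:Int) ≤ pvLo L v k := by rw [hlo_eq]; positivity
      have : (pvHi L v k).toNat = (pvLo L v k).toNat + 1 := by omega
      rw [this]
      omega
    rw [hx2]
    calc 2*k ≤ ((L.count v : Nat) : Int) := h2k
      _ ≤ pvBase L := pvCount_le_base' L hL v
      _ ≤ (pvLA L M).foldl max (pvBase L) := (PySem.List.le_foldl_max _ _).1

lemma pvMax_eq' (L : List Int) (M : Int) (hL : L ≠ []) (hb : ∀ v ∈ L, 0 ≤ v ∧ v < M) :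
    (pvLA L M).foldl max (pvBase L) = (pvLB L M).foldl max (pvBase L) := by
  apply le_antisymm
  · refine pvFoldlMaxLe _ _ _ (PySem.List.le_foldl_max _ _).1 ?_
    intro x hx
    exact (PySem.List.le_foldl_max _ _).2 _ (pvLA_subset L M hb x hx)
  · exact pvFoldlMaxLe _ _ _ (le_refl _ |>.trans (PySem.List.le_foldl_max _ _).1) (pvLB_le L M hL)

def pvPos0 (M K : Int) : List (List Int) :=
  (PySem.List.pyRange 0 M).map (fun _ => (PySem.List.pyRange 0 (K+1)).map (fun _ => (-1 : Int)))
def pvLeft0 (M N : Int) : List (List Int) :=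
  (PySem.List.pyRange 0 M).map (fun _ => (PySem.List.pyRange 0 N).map (fun _ => (0 : Int)))

def pvStepA1 (M : Int) (st : PySem.Dict Int Int × List (List Int) × List (List Int)) (p : Int × Int) :
    PySem.Dict Int Int × List (List Int) × List (List Int) :=
  let i := p.1
  let v := p.2
  let cwc := st.1.modify v 0 (· + 1)
  let pos := pvSet2 st.2.1 v (cwc.getD v 0) i
  let left := if 0 < i then
      (PySem.List.pyRange 0 M).foldl (fun lf u => pvSet2 lf u i (pvGet2 lf u (i-1))) st.2.2
    else st.2.2
  let left := pvSet2 left v i (pvGet2 left v i + 1)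
  (cwc, pos, left)

def pvStA (L : List Int) (M K N : Int) (t : Nat) :
    PySem.Dict Int Int × List (List Int) × List (List Int) :=
  (PySem.List.enumerate (L.take t) 0).foldl (pvStepA1 M)
    ((PySem.Dict.empty : PySem.Dict Int Int), pvPos0 M K, pvLeft0 M N)

lemma pvCopy (M : Int) (W : Nat) (i : Int) (hi1 : 1 ≤ i) (hiW : i < (W : Int)) :
    ∀ (a : Int) (lf : List (List Int)), 0 ≤ a → pvShape lf M.toNat W →
      pvShape ((PySem.List.pyRange a M).foldl (fun lf u => pvSet2 lf u i (pvGet2 lf u (i-1))) lf) M.toNat W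
      ∧ ∀ u' i', 0 ≤ u' → u' < M → 0 ≤ i' →
        pvGet2 ((PySem.List.pyRange a M).foldl (fun lf u => pvSet2 lf u i (pvGet2 lf u (i-1))) lf) u' i'
          = if a ≤ u' ∧ i' = i then pvGet2 lf u' (i-1) else pvGet2 lf u' i' := by
  intro a
  by_cases hM : a < M
  case neg =>
    intro lf _ hsh
    rw [PySem.List.pyRange_one_eq_nil (by omega)]
    refine ⟨hsh, ?_⟩
    intro u' i' _ hu2 _
    rw [if_neg (by omega), List.foldl_nil]
  case pos =>
    have hrec : ∀ (d : Nat) (a : Int), 0 ≤ a → (M - a).toNat = d → ∀ (lf : List (List Int)), pvShape lf M.toNat W →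
      pvShape ((PySem.List.pyRange a M).foldl (fun lf u => pvSet2 lf u i (pvGet2 lf u (i-1))) lf) M.toNat W
      ∧ ∀ u' i', 0 ≤ u' → u' < M → 0 ≤ i' →
        pvGet2 ((PySem.List.pyRange a M).foldl (fun lf u => pvSet2 lf u i (pvGet2 lf u (i-1))) lf) u' i'
          = if a ≤ u' ∧ i' = i then pvGet2 lf u' (i-1) else pvGet2 lf u' i' := by
      intro d
      induction d with
      | zero =>
        intro a ha hd lf hsh
        rw [PySem.List.pyRange_one_eq_nil (by omega)]
        refine ⟨hsh, ?_⟩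
        intro u' i' _ hu2 _
        rw [if_neg (by omega), List.foldl_nil]
      | succ d ihd =>
        intro a ha hd lf hsh
        rw [PySem.List.pyRange_one_cons (by omega), List.foldl_cons]
        have hsh' : pvShape (pvSet2 lf a i (pvGet2 lf a (i-1))) M.toNat W :=
          pvShape_set2 lf M.toNat W a i _ hsh ha (by omega) (by omega)
        obtain ⟨hshr, hval⟩ := ihd (a+1) (by omega) (by omega) _ hsh'
        refine ⟨hshr, ?_⟩
        intro u' i' hu1 hu2 hi'
        rw [hval u' i' hu1 hu2 hi']
        have hg1 : pvGet2 (pvSet2 lf a i (pvGet2 lf a (i-1))) u' (i-1)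
            = pvGet2 lf u' (i-1) := by
          rw [pvGet2_set2 lf M.toNat W a i u' (i-1) _ hsh ha (by omega) (by omega) (by omega) hu1 (by omega),
              if_neg (by omega)]
        have hg2 : pvGet2 (pvSet2 lf a i (pvGet2 lf a (i-1))) u' i'
            = if u' = a ∧ i' = i then pvGet2 lf a (i-1) else pvGet2 lf u' i' := by
          rw [pvGet2_set2 lf M.toNat W a i u' i' _ hsh ha (by omega) (by omega) (by omega) hu1 hi']
        by_cases hc1 : a + 1 ≤ u' ∧ i' = i
        · rw [if_pos hc1, if_pos (by omega), hg1]
        · rw [if_neg hc1, hg2]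
          by_cases hc2 : u' = a ∧ i' = i
          · rw [if_pos hc2, if_pos (by omega)]
            rw [hc2.1]
          · rw [if_neg hc2, if_neg (by omega)]
    intro lf ha hsh
    exact hrec (M - a).toNat a ha rfl lf hsh

lemma pvLeft0_get (M N u i : Int) (hu1 : 0 ≤ u) (hu2 : u < M) (hi1 : 0 ≤ i) (hi2 : i < N) :
    pvGet2 (pvLeft0 M N) u i = 0 := by
  unfold pvGet2 pvLeft0
  rw [PySem.List.pyGetD_map_pyRange_of_nonneg _ M u [] hu1 hu2,
      PySem.List.pyGetD_map_pyRange_of_nonneg _ N i 0 hi1 hi2]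

lemma pvStA_inv (L : List Int) (M K N : Int)
    (hb : ∀ v ∈ L, 0 ≤ v ∧ v < M) (hM : 1 ≤ M) (hK0 : 0 ≤ K)
    (hK : ∀ v : Int, (L.count v : Int) ≤ K) (hN : (L.length : Int) ≤ N) :
    ∀ t, t ≤ L.length →
      (pvStA L M K N t).1
          = (L.take t).foldl (fun d x => d.modify x 0 (· + 1)) (PySem.Dict.empty : PySem.Dict Int Int)
      ∧ pvShape (pvStA L M K N t).2.1 M.toNat (K+1).toNat
      ∧ pvShape (pvStA L M K N t).2.2 M.toNat N.toNat
      ∧ (∀ v kk : Int, 0 ≤ v → v < M → 1 ≤ kk → kk ≤ ((L.take t).count v : Int) →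
          pvGet2 (pvStA L M K N t).2.1 v kk = PySem.List.pyGetD (pvPosN L v t) (kk-1) 0)
      ∧ (∀ u i : Int, 0 ≤ u → u < M → 0 ≤ i →
          ((i < (t : Int) → pvGet2 (pvStA L M K N t).2.2 u i = pvCnt L u (i.toNat+1))
           ∧ ((t : Int) ≤ i → i < N → pvGet2 (pvStA L M K N t).2.2 u i = 0))) := by
  intro t
  induction t with
  | zero =>
    intro _
    refine ⟨rfl, ?_, ?_, ?_, ?_⟩
    · constructor
      · simp [pvStA, pvPos0, PySem.List.length_pyRange_one]
      · intro r hr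
        simp only [pvStA, List.take_zero, PySem.List.enumerate, List.foldl_nil] at hr
        unfold pvPos0 at hr
        rw [List.mem_map] at hr
        obtain ⟨_, _, rfl⟩ := hr
        simp [PySem.List.length_pyRange_one]
    · constructor
      · simp [pvStA, pvLeft0, PySem.List.length_pyRange_one]
      · intro r hr
        simp only [pvStA, List.take_zero, PySem.List.enumerate, List.foldl_nil] at hr
        unfold pvLeft0 at hr
        rw [List.mem_map] at hr
        obtain ⟨_, _, rfl⟩ := hr
        simp [PySem.List.length_pyRange_one]
    · intro v kk _ _ hk1 hk2
      simp at hk2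
      omega
    · intro u i hu1 hu2 hi
      constructor
      · intro h
        omega
      · intro _ h2
        exact pvLeft0_get M N u i hu1 hu2 hi h2
  | succ t iht =>
    intro ht1
    have ht : t < L.length := by omega
    obtain ⟨i1, i2, i3, i4, i5⟩ := iht (le_of_lt ht)
    have hstep : pvStA L M K N (t+1) = pvStepA1 M (pvStA L M K N t) ((t : Int), L[t]) := by
      unfold pvStA
      rw [pvEnumTake L t ht, List.foldl_append, List.foldl_cons, List.foldl_nil]
    set st := pvStA L M K N t with hst
    set v := L[t] with hv
    have hvb : 0 ≤ v ∧ v < M := hb v (List.getElem_mem ht)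
    -- the new counter
    have hcwc : (st.1.modify v 0 (· + 1))
        = (L.take (t+1)).foldl (fun d x => d.modify x 0 (· + 1)) (PySem.Dict.empty : PySem.Dict Int Int) := by
      rw [List.take_add_one, List.getElem?_eq_getElem ht]
      simp only [Option.toList_some, List.foldl_append, List.foldl_cons, List.foldl_nil]
      rw [i1]
    have hcv : (st.1.modify v 0 (· + 1)).getD v 0 = ((L.take (t+1)).count v : Int) := by
      rw [hcwc, PySem.Dict.getD_foldl_modify_add_one]
      have : (PySem.Dict.empty : PySem.Dict Int Int).getD v 0 = 0 := rfl
      rw [this]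
      omega
    have hcvv : ((L.take (t+1)).count v : Int) = ((L.take t).count v : Int) + 1 := by
      have := pvCnt_take_succ L v t ht
      rw [if_pos rfl] at this
      push_cast [this]
      ring
    have hcvK : ((L.take (t+1)).count v : Int) ≤ K := by
      have h1 : (L.take (t+1)).count v ≤ L.count v := (List.take_sublist _ L).count_le v
      have := hK v
      omega
    -- the new pos table
    have hposS : pvShape (pvSet2 st.2.1 v ((st.1.modify v 0 (· + 1)).getD v 0) (t : Int)) M.toNat (K+1).toNat := by
      refine pvShape_set2 _ _ _ _ _ _ i2 hvb.1 (by omega) (by rw [hcv]; positivity)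
    have hposG : ∀ v' kk : Int, 0 ≤ v' → v' < M → 1 ≤ kk → kk ≤ ((L.take (t+1)).count v' : Int) →
        pvGet2 (pvSet2 st.2.1 v ((st.1.modify v 0 (· + 1)).getD v 0) (t : Int)) v' kk
          = PySem.List.pyGetD (pvPosN L v' (t+1)) (kk-1) 0 := by
      intro v' kk hv1 hv2 hk1 hk2
      rw [hcv, pvGet2_set2 st.2.1 M.toNat (K+1).toNat v _ v' kk _ i2 hvb.1 (by omega)
          (by positivity) (by omega) hv1 (by omega)]
      by_cases hcase : v' = v ∧ kk = ((L.take (t+1)).count v : Int)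
      · rw [if_pos hcase, pvPosN_succ L v' t ht, if_pos (by rw [hcase.1])]
        have hlen : (pvPosN L v' t).length = (L.take t).count v' := pvPosN_length L v' t (le_of_lt ht)
        have hidx : (kk-1).toNat = (pvPosN L v' t).length := by
          rw [hlen, hcase.1]
          have := hcvv
          omega
        rw [PySem.List.pyGetD_of_nonneg _ _ (by omega), List.getD_eq_getElem?_getD, hidx,
            List.getElem?_append_right (le_refl _)]
        simp
      · rw [if_neg hcase, pvPosN_succ L v' t ht]
        by_cases hveq : v' = v
        · have hkk : kk ≤ ((L.take t).count v' : Int) := by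
            rw [hveq] at hk2 ⊢
            omega
          rw [i4 v' kk hv1 hv2 hk1 hkk, if_pos (by rw [hveq]),
              PySem.List.pyGetD_of_nonneg _ _ (by omega : (0:Int) ≤ kk - 1),
              PySem.List.pyGetD_of_nonneg _ _ (by omega : (0:Int) ≤ kk - 1),
              List.getD_eq_getElem?_getD, List.getD_eq_getElem?_getD,
              List.getElem?_append_left (by
                rw [pvPosN_length L v' t (le_of_lt ht)]
                rw [hveq] at hk2 ⊢
                omega)]
        · have hcnt : (L.take (t+1)).count v' = (L.take t).count v' := by
            rw [pvCnt_take_succ L v' t ht, if_neg (by rw [← hv]; intro h; exact hveq h.symm)]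
            omega
          rw [i4 v' kk hv1 hv2 hk1 (by rw [← hcnt]; exact hk2),
              if_neg (by rw [← hv]; intro h; exact hveq h.symm), List.append_nil]
    -- the new left table
    have hiN : (t : Int) < N := by
      have : (t : Int) < (L.length : Int) := by exact_mod_cast ht
      omega
    set left1 := (if 0 < (t : Int) then
        (PySem.List.pyRange 0 M).foldl (fun lf u => pvSet2 lf u (t : Int) (pvGet2 lf u ((t : Int)-1))) st.2.2
      else st.2.2) with hleft1
    have hL1 : pvShape left1 M.toNat N.toNat ∧ ∀ u' i', 0 ≤ u' → u' < M → 0 ≤ i' →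
        pvGet2 left1 u' i' = if i' = (t : Int) ∧ 0 < (t : Int) then pvGet2 st.2.2 u' ((t : Int)-1)
          else pvGet2 st.2.2 u' i' := by
      rw [hleft1]
      by_cases ht0 : 0 < (t : Int)
      · rw [if_pos ht0]
        obtain ⟨hsh, hval⟩ := pvCopy M N.toNat (t : Int) (by omega) (by omega) 0 st.2.2 (le_refl 0) i3
        refine ⟨hsh, ?_⟩
        intro u' i' hu1 hu2 hi'
        rw [hval u' i' hu1 hu2 hi']
        by_cases hc : i' = (t : Int)
        · rw [if_pos ⟨hu1, hc⟩, if_pos ⟨hc, ht0⟩]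
        · rw [if_neg (by tauto), if_neg (by tauto)]
      · rw [if_neg ht0]
        refine ⟨i3, ?_⟩
        intro u' i' _ _ _
        rw [if_neg (by tauto)]
    have hXv : pvGet2 left1 v (t : Int) = pvCnt L v t := by
      rw [hL1.2 v (t : Int) hvb.1 hvb.2 (by omega)]
      by_cases ht0 : 0 < (t : Int)
      · rw [if_pos ⟨rfl, ht0⟩, (i5 v ((t : Int)-1) hvb.1 hvb.2 (by omega)).1 (by omega)]
        unfold pvCnt
        have harg : ((t : Int)-1).toNat + 1 = t := by omega
        rw [harg]
      · rw [if_neg (by tauto), (i5 v (t : Int) hvb.1 hvb.2 (by omega)).2 (by omega) hiN]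
        have ht00 : t = 0 := by omega
        simp [pvCnt, ht00]
    have hlsh : pvShape (pvSet2 left1 v (t : Int) (pvGet2 left1 v (t : Int) + 1)) M.toNat N.toNat :=
      pvShape_set2 _ _ _ _ _ _ hL1.1 hvb.1 (by omega) (by omega)
    have hlget : ∀ u i : Int, 0 ≤ u → u < M → 0 ≤ i →
        ((i < ((t+1 : Nat) : Int) → pvGet2 (pvSet2 left1 v (t : Int) (pvGet2 left1 v (t : Int) + 1)) u i = pvCnt L u (i.toNat+1))
         ∧ (((t+1 : Nat) : Int) ≤ i → i < N → pvGet2 (pvSet2 left1 v (t : Int) (pvGet2 left1 v (t : Int) + 1)) u i = 0)) := by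
      intro u i hu1 hu2 hi1
      have hset := pvGet2_set2 left1 M.toNat N.toNat v (t : Int) u i (pvGet2 left1 v (t : Int) + 1) hL1.1 hvb.1 (by omega) (by omega) (by omega) hu1 hi1
      constructor
      · intro hilt
        rw [hset]
        by_cases hc : u = v ∧ i = (t : Int)
        · rw [if_pos hc, hXv, hc.2, hc.1]
          have : ((t : Int)).toNat = t := by omega
          rw [this]
          unfold pvCnt
          rw [pvCnt_take_succ L v t ht, if_pos rfl]
          push_cast
          ring
        · rw [if_neg hc, hL1.2 u i hu1 hu2 hi1]
          by_cases hit : i = (t : Int)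
          · -- u ≠ v, i = t : the copied value
            have hunv : ¬ u = v := fun h => hc ⟨h, hit⟩
            by_cases ht0 : 0 < (t : Int)
            · rw [if_pos ⟨hit, ht0⟩, (i5 u ((t : Int)-1) hu1 hu2 (by omega)).1 (by omega)]
              unfold pvCnt
              rw [hit]
              have h1 : (((t : Int))-1).toNat + 1 = t := by omega
              have h2 : ((t : Int)).toNat + 1 = t + 1 := by omega
              rw [h1, h2, pvCnt_take_succ L u t ht,
                  if_neg (by rw [← hv]; intro h; exact hunv h.symm)]
              push_cast
              ring
            · rw [if_neg (by tauto), (i5 u i hu1 hu2 hi1).2 (by omega) (by omega)]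
              have ht00 : t = 0 := by omega
              unfold pvCnt
              rw [hit]
              have : ((t : Int)).toNat + 1 = t + 1 := by omega
              rw [this, pvCnt_take_succ L u t ht,
                  if_neg (by rw [← hv]; intro h; exact hunv h.symm), ht00]
              simp
          · rw [if_neg (by tauto), (i5 u i hu1 hu2 hi1).1 (by omega)]
      · intro hige hiN'
        rw [hset, if_neg (by omega), hL1.2 u i hu1 hu2 hi1, if_neg (by omega),
            (i5 u i hu1 hu2 hi1).2 (by omega) hiN']
    -- assemble
    rw [hstep]
    refine ⟨?_, ?_, ?_, ?_, ?_⟩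
    · exact hcwc
    · exact hposS
    · exact hlsh
    · exact hposG
    · exact hlget

def pvStepA2 (M : Int) (wc : PySem.Dict Int Int) (pos left : List (List Int))
    (st : PySem.Dict Int Int × Int) (p : Int × Int) : PySem.Dict Int Int × Int :=
  let i := p.1
  let v := p.2
  let cwc := st.1.modify v 0 (· + 1)
  let j := pvGet2 pos v (wc.getD v 0 - cwc.getD v 0 + 1) - 1
  let ans := if i < j then
      (PySem.List.pyRange 0 M).foldl
        (fun a u => max a (cwc.getD v 0 * 2 + (pvGet2 left u j - pvGet2 left u i))) st.2
    else st.2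
  (cwc, ans)

def pvLAt (L : List Int) (M : Int) (t : Nat) : List Int :=
  (PySem.List.enumerate (L.take t) 0).flatMap (fun p =>
    if pvLo L p.2 (pvCnt L p.2 (p.1.toNat + 1)) + 1 < pvHi L p.2 (pvCnt L p.2 (p.1.toNat + 1)) then
      (PySem.List.pyRange 0 M).map (fun u => pvCand L p.2 (pvCnt L p.2 (p.1.toNat + 1)) u)
    else [])

lemma pvLoop2 (L : List Int) (M N : Int)
    (hL : L ≠ []) (hb : ∀ v ∈ L, 0 ≤ v ∧ v < M) (hM : 1 ≤ M) (hN : (L.length : Int) ≤ N) :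
    ∀ t, t ≤ L.length →
      ((PySem.List.enumerate (L.take t) 0).foldl
          (pvStepA2 M (PySem.Dict.counter L)
            (pvStA L M (pvBase L) N L.length).2.1 (pvStA L M (pvBase L) N L.length).2.2)
          ((PySem.Dict.empty : PySem.Dict Int Int), pvBase L)).1
        = (L.take t).foldl (fun d x => d.modify x 0 (· + 1)) (PySem.Dict.empty : PySem.Dict Int Int)
      ∧ ((PySem.List.enumerate (L.take t) 0).foldl
          (pvStepA2 M (PySem.Dict.counter L)
            (pvStA L M (pvBase L) N L.length).2.1 (pvStA L M (pvBase L) N L.length).2.2)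
          ((PySem.Dict.empty : PySem.Dict Int Int), pvBase L)).2
        = (pvLAt L M t).foldl max (pvBase L) := by
  have hK0 : 0 ≤ pvBase L := by
    obtain ⟨k0, _, hbe⟩ := pvBase_mem L hL
    rw [hbe]; positivity
  obtain ⟨_, _, _, hpos, hleft⟩ := pvStA_inv L M (pvBase L) N hb hM hK0
    (fun v => pvCount_le_base' L hL v) hN L.length (le_refl _)
  intro t
  induction t with
  | zero =>
    intro _
    exact ⟨rfl, rfl⟩
  | succ t iht =>
    intro ht1
    have ht : t < L.length := by omega
    obtain ⟨j1, j2⟩ := iht (le_of_lt ht)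
    rw [pvEnumTake L t ht, List.foldl_append, List.foldl_cons, List.foldl_nil]
    set st2 := ((PySem.List.enumerate (L.take t) 0).foldl
          (pvStepA2 M (PySem.Dict.counter L)
            (pvStA L M (pvBase L) N L.length).2.1 (pvStA L M (pvBase L) N L.length).2.2)
          ((PySem.Dict.empty : PySem.Dict Int Int), pvBase L)) with hst2
    set v := L[t] with hv
    have hvb : 0 ≤ v ∧ v < M := hb v (List.getElem_mem ht)
    have hcwc : (st2.1.modify v 0 (· + 1))
        = (L.take (t+1)).foldl (fun d x => d.modify x 0 (· + 1)) (PySem.Dict.empty : PySem.Dict Int Int) := by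
      rw [List.take_add_one, List.getElem?_eq_getElem ht]
      simp only [Option.toList_some, List.foldl_append, List.foldl_cons, List.foldl_nil]
      rw [j1]
    set k := ((L.take (t+1)).count v : Int) with hkdef
    have hcv : (st2.1.modify v 0 (· + 1)).getD v 0 = k := by
      rw [hcwc, PySem.Dict.getD_foldl_modify_add_one]
      have : (PySem.Dict.empty : PySem.Dict Int Int).getD v 0 = 0 := rfl
      rw [this, hkdef]
      omega
    have hk1 : 1 ≤ k := by
      rw [hkdef]
      have := pvK_pos L t ht
      unfold pvCnt at this
      exact_mod_cast this
    have hkc : k ≤ (L.count v : Int) := by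
      rw [hkdef]
      exact_mod_cast (List.take_sublist _ L).count_le v
    have hwc : (PySem.Dict.counter L).getD v 0 = (L.count v : Int) := PySem.Dict.getD_counter L v
    have hcountn : ((L.take L.length).count v : Int) = (L.count v : Int) := by rw [List.take_length]
    -- the pos read gives pvHi
    have hposr : pvGet2 (pvStA L M (pvBase L) N L.length).2.1 v ((L.count v : Int) - k + 1)
        = pvHi L v k := by
      rw [hpos v ((L.count v : Int) - k + 1) hvb.1 hvb.2 (by omega) (by omega)]
      unfold pvHi pvPosF
      congr 1
      omega
    -- pvLo equals the current index
    have hcnt_t : ((L.take t).count v : Int) = k - 1 := by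
      rw [hkdef]
      have := pvCnt_take_succ L v t ht
      rw [if_pos rfl] at this
      push_cast [this]
      ring
    have hlo : pvLo L v k = (t : Int) := by
      have hlen := pvPosF_length L v
      have hlt : (k-1).toNat < (pvPosF L v).length := by omega
      obtain ⟨hk2, hg⟩ := pvPosF_getElem_of_idx L v t ht rfl
      unfold pvLo
      rw [PySem.List.pyGetD_of_nonneg _ _ (by omega), List.getD_eq_getElem?_getD,
          List.getElem?_eq_getElem hlt, Option.getD_some]
      have : (k-1).toNat = (L.take t).count v := by omega
      rw [← hg]
      congr 1
    obtain ⟨ih, hih, hhi_eq, _, _⟩ := pvHi_spec L v k hk1 hkc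
    have hhi0 : 0 ≤ pvHi L v k := by rw [hhi_eq]; positivity
    have hhin : pvHi L v k ≤ (L.length : Int) := by rw [hhi_eq]; exact_mod_cast le_of_lt hih
    constructor
    · exact hcwc
    · show (if (t : Int) < pvGet2 _ v ((PySem.Dict.counter L).getD v 0 - (st2.1.modify v 0 (· + 1)).getD v 0 + 1) - 1 then _ else _) = _
      rw [hcv, hwc, hposr]
      have hLAstep : pvLAt L M (t+1) = pvLAt L M t ++
          (if pvLo L v k + 1 < pvHi L v k then
            (PySem.List.pyRange 0 M).map (fun u => pvCand L v k u) else []) := by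
        unfold pvLAt
        rw [pvEnumTake L t ht, List.flatMap_append]
        congr 1
        simp only [List.flatMap_cons, List.flatMap_nil, List.append_nil, Int.toNat_natCast]
        rw [← hv]
        rw [show pvCnt L v (t+1) = k from by rw [hkdef]; rfl]
      rw [hLAstep, List.foldl_append]
      by_cases hc : pvLo L v k + 1 < pvHi L v k
      · rw [if_pos (by omega), if_pos hc]
        rw [List.foldl_map]
        rw [← j2]
        apply PySem.List.foldl_congr_mem
        intro a u hu
        obtain ⟨hu1, hu2⟩ := PySem.List.mem_pyRange_one.mp hu
        have hj1 : 0 ≤ pvHi L v k - 1 := by omega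
        have hjlt : pvHi L v k - 1 < (L.length : Int) := by omega
        have hrd1 : pvGet2 (pvStA L M (pvBase L) N L.length).2.2 u (pvHi L v k - 1)
            = pvCnt L u ((pvHi L v k - 1).toNat + 1) :=
          (hleft u (pvHi L v k - 1) hu1 hu2 hj1).1 (by omega)
        have hrd2 : pvGet2 (pvStA L M (pvBase L) N L.length).2.2 u (t : Int)
            = pvCnt L u ((t : Int).toNat + 1) :=
          (hleft u (t : Int) hu1 hu2 (by omega)).1 (by exact_mod_cast ht)
        rw [hrd1, hrd2]
        unfold pvCand
        have e1 : (pvHi L v k - 1).toNat + 1 = (pvHi L v k).toNat := by omega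
        have e2 : ((t : Int)).toNat + 1 = (pvLo L v k).toNat + 1 := by omega
        rw [e1, e2]
        ring_nf
      · rw [if_neg (by omega), if_neg hc, List.foldl_nil]
        exact j2

lemma pvAnsA_unfold (N : Int) (A : List Int) : solve N A =
    ((PySem.List.enumerate (pvRemap A) 0).foldl
      (pvStepA2 (pvM A) (PySem.Dict.counter (pvRemap A))
        ((PySem.List.enumerate (pvRemap A) 0).foldl (pvStepA1 (pvM A))
          ((PySem.Dict.empty : PySem.Dict Int Int), pvPos0 (pvM A) (pvBase (pvRemap A)), pvLeft0 (pvM A) N)).2.1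
        ((PySem.List.enumerate (pvRemap A) 0).foldl (pvStepA1 (pvM A))
          ((PySem.Dict.empty : PySem.Dict Int Int), pvPos0 (pvM A) (pvBase (pvRemap A)), pvLeft0 (pvM A) N)).2.2)
      ((PySem.Dict.empty : PySem.Dict Int Int), pvBase (pvRemap A))).2 := rfl

lemma pvSolveA_eq' (N : Int) (A : List Int) (hA : A ≠ []) (hN : PySem.List.len A ≤ N) :
    solve N A = (pvLA (pvRemap A) (pvM A)).foldl max (pvBase (pvRemap A)) := by
  have hLne : pvRemap A ≠ [] := by
    intro h
    have := pvRemap_length A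
    rw [h] at this
    exact hA (List.eq_nil_of_length_eq_zero this.symm)
  have hb := pvRemap_bound A hA
  have hM := pvM_pos A hA
  have hNN : (((pvRemap A).length : Nat) : Int) ≤ N := by
    rw [pvRemap_length]
    simpa [PySem.List.len_eq] using hN
  have h2 := (pvLoop2 (pvRemap A) (pvM A) N hLne hb hM hNN (pvRemap A).length (le_refl _)).2
  rw [pvAnsA_unfold N A,
      show (PySem.List.enumerate (pvRemap A) 0)
        = (PySem.List.enumerate ((pvRemap A).take (pvRemap A).length) 0) from by
          rw [List.take_length],
      show ((PySem.List.enumerate ((pvRemap A).take (pvRemap A).length) 0).foldl (pvStepA1 (pvM A))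
          ((PySem.Dict.empty : PySem.Dict Int Int), pvPos0 (pvM A) (pvBase (pvRemap A)), pvLeft0 (pvM A) N))
        = pvStA (pvRemap A) (pvM A) (pvBase (pvRemap A)) N (pvRemap A).length from rfl,
      h2,
      show pvLAt (pvRemap A) (pvM A) (pvRemap A).length = pvLA (pvRemap A) (pvM A) from by
        unfold pvLAt pvLA
        rw [List.take_length]]

lemma pvSolveB_eq' (N : Int) (A : List Int) (hA : A ≠ []) :
    solve_alt N A = (pvLB (pvRemap A) (pvM A)).foldl max (pvBase (pvRemap A)) := by
  have hLne : pvRemap A ≠ [] := by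
    intro h
    have := pvRemap_length A
    rw [h] at this
    exact hA (List.eq_nil_of_length_eq_zero this.symm)
  rw [pvAnsB_unfold N A]
  exact pvAnsB_eq (pvRemap A) (pvM A) hLne (pvRemap_bound A hA)

lemma pvMax_eq'' (A : List Int) (hA : A ≠ []) :
    (pvLA (pvRemap A) (pvM A)).foldl max (pvBase (pvRemap A))
      = (pvLB (pvRemap A) (pvM A)).foldl max (pvBase (pvRemap A)) := by
  have hLne : pvRemap A ≠ [] := by
    intro h
    have := pvRemap_length A
    rw [h] at this
    exact hA (List.eq_nil_of_length_eq_zero this.symm)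
  exact pvMax_eq' (pvRemap A) (pvM A) hLne (pvRemap_bound A hA)

-- ===== VERDICT (by name: the statement is the Claim_ definition above) =====
theorem solve_spec : Claim_equal_solve := by
  intro N A _hdom hpre
  unfold Spec_solve
  obtain ⟨hA, hN⟩ := hpre
  rw [pvSolveA_eq' N A hA hN, pvMax_eq'' A hA, ← pvSolveB_eq' N A hA]
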